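-- pv_equiv track=rewrite | github.com/viviable/seccodeprm | data/collect_data.py | _build_step_line_ranges
-- ===== SOURCE A (Python) =====
-- def _build_step_line_ranges(completions):
--     line_ranges = []
--     current_start = 1
--     for completion in completions:
--         if not completion:
--             line_ranges.append((current_start, current_start - 1))
--             continue
--         line_count = completion.count("\n") + 1
--         line_ranges.append((current_start, current_start + line_count - 1))
--         current_start += line_count + 2
--     return line_ranges
-- ===== SOURCE B (Python) =====
-- def _build_step_line_ranges(completions):
--     # Divide and conquer: a segment is summarised as (ranges anchored at line 1,
--     # total line advance); two summaries combine by concatenating the left ranges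
--     # with the right ranges translated by the left advance.
--     def solve(lo, hi):
--         if hi - lo == 0:
--             return [], 0
--         if hi - lo == 1:
--             c = completions[lo]
--             if not c:
--                 return [(1, 0)], 0
--             n = c.count("\n") + 1
--             return [(1, n)], n + 2
--         mid = (lo + hi) // 2
--         rl, al = solve(lo, mid)
--         rr, ar = solve(mid, hi)
--         return rl + [(a + al, b + al) for a, b in rr], al + ar
--     return solve(0, len(completions))[0]
-- ===== Notes on version B (the rewrite author's own statement) =====
-- stated objective: alternative
-- what changed: Replaces the forward loop threading a running start counter with divide and conquer: each half is summarised as (ranges anchored at line 1, total line advance) and the two summaries combine by translating the right half's ranges by the left half's advance.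
import Mathlib
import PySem

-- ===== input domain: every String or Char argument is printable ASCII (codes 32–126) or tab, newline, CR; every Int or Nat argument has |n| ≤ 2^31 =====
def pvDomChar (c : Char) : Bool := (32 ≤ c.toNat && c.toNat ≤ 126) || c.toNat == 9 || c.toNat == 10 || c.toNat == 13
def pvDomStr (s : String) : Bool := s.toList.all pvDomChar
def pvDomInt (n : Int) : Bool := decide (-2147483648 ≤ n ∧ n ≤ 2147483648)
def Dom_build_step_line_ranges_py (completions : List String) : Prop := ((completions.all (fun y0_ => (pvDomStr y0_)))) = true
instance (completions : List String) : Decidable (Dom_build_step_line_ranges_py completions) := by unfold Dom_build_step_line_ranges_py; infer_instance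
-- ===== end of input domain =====

-- B replaces A's forward cursor loop by divide and conquer: a segment is summarised as
-- (ranges anchored at line 1, total advance) and halves combine by shifting the right part;
-- return values proved equal on all inputs.

-- ===== PORT A =====
-- A's loop threads (accumulated list, current_start); ported as the obvious structural recursion over the same state.
def build_step_line_ranges_py_go (completions : List String) (current_start : Int) : List (Int × Int) :=
  match completions with
  | [] => []
  | c :: rest =>
    if c = "" then
      (current_start, current_start - 1) :: build_step_line_ranges_py_go rest current_start
    else
      let line_count : Int := (PySem.Str.count c "\n" : Int) + 1
      (current_start, current_start + line_count - 1) ::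
        build_step_line_ranges_py_go rest (current_start + line_count + 2)

def build_step_line_ranges_py (completions : List String) : List (Int × Int) :=
  build_step_line_ranges_py_go completions 1

-- ===== PORT B =====
-- Source B's solve(lo, hi) works on the slice completions[lo:hi]; the left half has
-- floor(length/2) elements, so it is ported as recursion on the list via take/drop.
def bslr_solve (cs : List String) : List (Int × Int) × Int :=
  match h : cs with
  | [] => ([], 0)
  | [c] =>
    if c = "" then ([(1, 0)], 0)
    else
      let n : Int := (PySem.Str.count c "\n" : Int) + 1
      ([(1, n)], n + 2)
  | _ :: _ :: _ =>
    let mid := cs.length / 2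
    let l := bslr_solve (cs.take mid)
    let r := bslr_solve (cs.drop mid)
    (l.1 ++ r.1.map (fun p => (p.1 + l.2, p.2 + l.2)), l.2 + r.2)
termination_by cs.length
decreasing_by
  · simp_all [List.length_take]; omega
  · simp_all [List.length_drop]; omega

def build_step_line_ranges_py_alt (completions : List String) : List (Int × Int) :=
  (bslr_solve completions).1

-- ===== PRECONDITION & SPEC =====
def Spec_build_step_line_ranges_py (completions : List String) (out : List (Int × Int)) : Prop := out = build_step_line_ranges_py_alt completions
instance (completions : List String) (out : List (Int × Int)) : Decidable (Spec_build_step_line_ranges_py completions out) := by unfold Spec_build_step_line_ranges_py; infer_instance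

-- ===== CLAIM (what is proved, stated in full; the proofs are below) =====
def Claim_equal_build_step_line_ranges_py : Prop := ∀ (completions : List String), Dom_build_step_line_ranges_py completions → Spec_build_step_line_ranges_py completions (build_step_line_ranges_py completions)

-- ===== LEMMAS AND PROOFS =====
-- total cursor advance of A over a list (reference quantity for the proofs)
def bslr_adv (cs : List String) : Int :=
  cs.foldr (fun c a => if c = "" then a else a + ((PySem.Str.count c "\n" : Int) + 1) + 2) 0

theorem bslr_adv_append (xs ys : List String) :
    bslr_adv (xs ++ ys) = bslr_adv xs + bslr_adv ys := by
  induction xs with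
  | nil => simp [bslr_adv]
  | cons c xs ih =>
    by_cases hc : c = "" <;> simp [bslr_adv, hc] at ih ⊢ <;> omega

-- A's loop over a concatenation splits, the right part starting after the left advance
theorem bslr_go_append (xs ys : List String) : ∀ (s : Int),
    build_step_line_ranges_py_go (xs ++ ys) s =
      build_step_line_ranges_py_go xs s ++ build_step_line_ranges_py_go ys (s + bslr_adv xs) := by
  induction xs with
  | nil => intro s; simp [build_step_line_ranges_py_go, bslr_adv]
  | cons c xs ih =>
    intro s
    by_cases hc : c = ""
    · simp [build_step_line_ranges_py_go, hc, bslr_adv, ih]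
    · have hadv : bslr_adv (c :: xs) = bslr_adv xs + ((PySem.Str.count c "\n" : Int) + 1) + 2 := by
        simp [bslr_adv, hc]
      simp only [List.cons_append, build_step_line_ranges_py_go, hc, ite_false, ih, hadv,
        List.cons.injEq, List.append_cancel_left_eq]
      refine ⟨trivial, ?_⟩
      congr 1
      ring

-- A's loop is shift-equivariant in its cursor
theorem bslr_go_shift (xs : List String) : ∀ (s t : Int),
    build_step_line_ranges_py_go xs s =
      (build_step_line_ranges_py_go xs t).map (fun p => (p.1 + (s - t), p.2 + (s - t))) := by
  induction xs with
  | nil => intro s t; rfl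
  | cons c xs ih =>
    intro s t
    by_cases hc : c = ""
    · simp [build_step_line_ranges_py_go, hc, ← ih s t]
    · simp only [build_step_line_ranges_py_go, hc, ite_false, List.map_cons, List.cons.injEq]
      refine ⟨by simp only [Prod.ext_iff]; constructor <;> ring, ?_⟩
      rw [ih (s + ((PySem.Str.count c "\n" : Int) + 1) + 2) (t + ((PySem.Str.count c "\n" : Int) + 1) + 2)]
      congr 1
      funext p
      simp only [Prod.ext_iff]
      constructor <;> ring

-- B's summary computes exactly A's canonical ranges and A's total advance
theorem bslr_solve_eq (cs : List String) :
    (bslr_solve cs).1 = build_step_line_ranges_py_go cs 1 ∧ (bslr_solve cs).2 = bslr_adv cs := by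
  fun_induction bslr_solve cs with
  | case1 => exact ⟨rfl, rfl⟩
  | case2 => simp [build_step_line_ranges_py_go, bslr_adv]
  | case3 c hc =>
    simp [build_step_line_ranges_py_go, bslr_adv, hc, PySem.Str.count]
    rfl
  | case4 a b tl m ihl ihr =>
    set xs := a :: b :: tl with hxs
    have hsplit : xs.take m ++ xs.drop m = xs := List.take_append_drop m xs
    refine ⟨?_, ?_⟩
    · show (bslr_solve (xs.take m)).1 ++
        List.map (fun p => (p.1 + (bslr_solve (xs.take m)).2, p.2 + (bslr_solve (xs.take m)).2))
          (bslr_solve (xs.drop m)).1 = build_step_line_ranges_py_go xs 1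
      conv_rhs => rw [← hsplit, bslr_go_append]
      rw [ihl.1, ihl.2]
      congr 1
      rw [bslr_go_shift (xs.drop m) (1 + bslr_adv (xs.take m)) 1, ihr.1]
      congr 1
      funext p
      simp only [Prod.ext_iff]
      constructor <;> ring
    · show (bslr_solve (xs.take m)).2 + (bslr_solve (xs.drop m)).2 = bslr_adv xs
      conv_rhs => rw [← hsplit, bslr_adv_append]
      rw [ihl.2, ihr.2]

-- ===== VERDICT (by name: the statement is the Claim_ definition above) =====
theorem build_step_line_ranges_py_spec : Claim_equal_build_step_line_ranges_py := by
  intro completions _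
  unfold Spec_build_step_line_ranges_py build_step_line_ranges_py build_step_line_ranges_py_alt
  exact (bslr_solve_eq completions).1.symm
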